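-- pv_equiv track=rewrite | github.com/pypi-data/pypi-mirror-132 | packages/crew-game/crew-game-0.1.0.tar.gz/crew-game-0.1.0/crew_game/core.py | tabulate_picked
-- ===== SOURCE A (Python) =====
-- def tabulate_picked(picked_goals):
--     header = [f"Player {idx}" for idx, _ in enumerate(picked_goals)]
--     table = []
--     max_rows = max([len(player_goals) for player_goals in picked_goals])
--     for row_idx in range(max_rows):
--         table.append(
--             [
--                 str(player_goals[row_idx]) if row_idx < len(player_goals) else ""
--                 for player_goals in picked_goals
--             ]
--         )
--     return header, table
-- ===== SOURCE B (Python) =====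
-- def tabulate_picked(picked_goals):
--     header = [f"Player {i}" for i in range(len(picked_goals))]
--     cols = [[str(g) for g in goals] for goals in picked_goals]
--     table = []
--     while any(cols):
--         table.append([c.pop(0) if c else "" for c in cols])
--     return header, table
-- ===== Notes on version B (the rewrite author's own statement) =====
-- stated objective: alternative
-- what changed: B transposes by repeatedly consuming the heads of per-player columns (a while-any loop popping one row at a time) instead of A's precomputed max-length index loop with a per-cell bounds test; Pre_ excludes only the empty list, on which A raises ValueError via max([]).
-- outside the precondition, e.g. on tabulate_picked([]): A raises ValueError, B returns ([], [])
import Mathlib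
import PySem

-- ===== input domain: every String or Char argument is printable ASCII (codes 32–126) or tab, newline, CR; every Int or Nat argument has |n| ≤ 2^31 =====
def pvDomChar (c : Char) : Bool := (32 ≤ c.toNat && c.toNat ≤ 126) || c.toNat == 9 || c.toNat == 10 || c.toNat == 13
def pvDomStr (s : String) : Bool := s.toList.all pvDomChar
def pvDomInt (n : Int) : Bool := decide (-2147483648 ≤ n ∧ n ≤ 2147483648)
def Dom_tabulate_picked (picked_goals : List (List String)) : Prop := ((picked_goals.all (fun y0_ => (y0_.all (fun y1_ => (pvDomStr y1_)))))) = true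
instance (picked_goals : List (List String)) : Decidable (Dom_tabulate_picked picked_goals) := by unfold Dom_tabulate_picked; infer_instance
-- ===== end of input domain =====

-- B transposes by repeatedly consuming column heads (a while-any loop) instead of A's max-length index loop; same cost ('alternative'); on [] A raises ValueError, B returns ([], []).

-- ===== PORT A =====
def tabulate_picked (picked_goals : List (List String)) : List String × List (List String) :=
  let header := (PySem.List.enumerate picked_goals).map (fun p => "Player " ++ PySem.Int.toStr p.1)
  -- max([...]) raises ValueError on empty picked_goals: excluded by Pre_; getD 0 is unreachable there
  let max_rows : Nat := (PySem.List.max? (picked_goals.map (fun g => g.length)) (fun x => x)).getD 0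
  let table := (List.range max_rows).map (fun row_idx =>
    picked_goals.map (fun player_goals =>
      if row_idx < player_goals.length then (PySem.List.pyGet? player_goals (Int.ofNat row_idx)).getD "" else ""))
  (header, table)

-- ===== PORT B =====
-- the while-any loop of Source B; fuel (total remaining cells) only makes the loop total, the algorithm is Source B's
def pvConsume : Nat → List (List String) → List (List String)
  | 0, _ => []
  | fuel + 1, cols =>
    if cols.any (fun c => !c.isEmpty) then
      (cols.map (fun c => c.headD "")) :: pvConsume fuel (cols.map List.tail)
    else []

def tabulate_picked_alt (picked_goals : List (List String)) : List String × List (List String) :=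
  let header := (List.range picked_goals.length).map (fun i => "Player " ++ PySem.Int.toStr (Int.ofNat i))
  let cols := picked_goals.map (fun goals => goals.map (fun g => g))
  (header, pvConsume (cols.map List.length).sum cols)

-- ===== PRECONDITION & SPEC =====
-- Pre_ excludes only the empty list, on which A raises ValueError via max([]).
def Pre_tabulate_picked (picked_goals : List (List String)) : Prop := picked_goals ≠ []
instance (picked_goals : List (List String)) : Decidable (Pre_tabulate_picked picked_goals) := by unfold Pre_tabulate_picked; infer_instance
def pvWitness_tabulate_picked : List (List String) := [["a", "b"], [], ["c"]]

def Spec_tabulate_picked (picked_goals : List (List String)) (out : List String × List (List String)) : Prop := out = tabulate_picked_alt picked_goals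
instance (picked_goals : List (List String)) (out : List String × List (List String)) : Decidable (Spec_tabulate_picked picked_goals out) := by unfold Spec_tabulate_picked; infer_instance

-- ===== CLAIM (what is proved, stated in full; the proofs are below) =====
def Claim_equal_tabulate_picked : Prop := ∀ (picked_goals : List (List String)), Dom_tabulate_picked picked_goals → Pre_tabulate_picked picked_goals → Spec_tabulate_picked picked_goals (tabulate_picked picked_goals)

-- ===== LEMMAS AND PROOFS =====

-- max length of the columns
def pvMaxLen (cols : List (List String)) : Nat := (cols.map List.length).foldr max 0

theorem pvMaxLen_zero {cols : List (List String)} (h : pvMaxLen cols = 0) : ∀ c ∈ cols, c = [] := by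
  induction cols with
  | nil => simp
  | cons c t ih =>
    simp only [pvMaxLen, List.map_cons, List.foldr_cons] at h
    obtain ⟨hc, ht⟩ := Nat.max_eq_zero_iff.mp h
    intro x hx
    rcases List.mem_cons.mp hx with rfl | hx
    · exact List.eq_nil_of_length_eq_zero hc
    · exact ih (by simpa [pvMaxLen] using ht) x hx

theorem pvAny_false {cols : List (List String)} (h : cols.any (fun c => !c.isEmpty) = false) :
    pvMaxLen cols = 0 := by
  induction cols with
  | nil => simp [pvMaxLen]
  | cons c t ih =>
    simp only [List.any_cons, Bool.or_eq_false_iff] at h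
    have hc : c = [] := by
      cases c
      · rfl
      · simp at h
    simp only [pvMaxLen, List.map_cons, List.foldr_cons, hc, List.length_nil]
    have := ih h.2
    simp only [pvMaxLen] at this
    omega

theorem pvMaxLen_tail (cols : List (List String)) : pvMaxLen (cols.map List.tail) = pvMaxLen cols - 1 := by
  induction cols with
  | nil => simp [pvMaxLen]
  | cons c t ih =>
    simp only [pvMaxLen, List.map_cons, List.foldr_cons] at *
    have hc : c.tail.length = c.length - 1 := by cases c <;> simp
    rw [hc, ih, Nat.max_def, Nat.max_def]
    split_ifs <;> omega

theorem pvMaxLen_le_sum (cols : List (List String)) : pvMaxLen cols ≤ (cols.map List.length).sum := by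
  induction cols with
  | nil => simp [pvMaxLen]
  | cons c t ih =>
    simp only [pvMaxLen, List.map_cons, List.foldr_cons, List.sum_cons] at *
    have := Nat.le_max_left c.length ((t.map List.length).foldr max 0)
    have := Nat.le_max_right c.length ((t.map List.length).foldr max 0)
    rw [Nat.max_def]
    split_ifs <;> omega

theorem pvConsume_eq (n : Nat) (fuel : Nat) (cols : List (List String))
    (hn : pvMaxLen cols = n) (hf : n ≤ fuel) :
    pvConsume fuel cols = (List.range n).map (fun r => cols.map (fun c => c.getD r "")) := by
  induction n generalizing cols fuel with
  | zero =>
    have hall := pvMaxLen_zero hn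
    have hany : cols.any (fun c => !c.isEmpty) = false := by
      simp only [List.any_eq_false]
      intro c hc
      simp [hall c hc]
    cases fuel with
    | zero => simp [pvConsume]
    | succ f => simp [pvConsume, hany]
  | succ n ih =>
    cases fuel with
    | zero => omega
    | succ f =>
      have hany : cols.any (fun c => !c.isEmpty) = true := by
        cases h' : cols.any (fun c => !c.isEmpty) with
        | true => rfl
        | false => have := pvAny_false h'; omega
      simp only [pvConsume, hany, if_pos]
      rw [ih f (cols.map List.tail) (by rw [pvMaxLen_tail, hn]; omega) (by omega)]
      rw [List.range_succ_eq_map]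
      simp only [List.map_cons, List.map_map]
      congr 1
      · apply List.map_congr_left
        intro c _
        cases c <;> simp [List.getD]
      · apply List.map_congr_left
        intro r _
        apply List.map_congr_left
        intro c _
        cases c <;> simp [List.getD]

theorem pvFoldl_max (l : List Nat) (x : Nat) : l.foldl max x = max x (l.foldr max 0) := by
  induction l generalizing x with
  | nil => simp
  | cons y t ih =>
    simp only [List.foldl_cons, List.foldr_cons]
    rw [ih, Nat.max_assoc]

theorem pvMax?_eq (cols : List (List String)) (h : cols ≠ []) :
    (PySem.List.max? (cols.map (fun g => g.length)) (fun x => x)).getD 0 = pvMaxLen cols := by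
  cases cols with
  | nil => exact absurd rfl h
  | cons c t =>
    rw [List.map_cons, PySem.List.max?_id_cons, Option.getD_some, pvFoldl_max]
    simp only [pvMaxLen, List.map_cons, List.foldr_cons]

theorem pvHeader_eq (xs : List (List String)) :
    (PySem.List.enumerate xs).map (fun p => "Player " ++ PySem.Int.toStr p.1) =
    (List.range xs.length).map (fun i => "Player " ++ PySem.Int.toStr (Int.ofNat i)) := by
  have key : ∀ (ys : List (List String)) (s : Int),
      (PySem.List.enumerate ys s).map (fun p => "Player " ++ PySem.Int.toStr p.1) =
      (List.range ys.length).map (fun i => "Player " ++ PySem.Int.toStr (Int.ofNat i + s)) := by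
    intro ys
    induction ys with
    | nil => intro s; simp [PySem.List.enumerate_nil]
    | cons y t ih =>
      intro s
      rw [PySem.List.enumerate_cons]
      simp only [List.map_cons, List.length_cons, List.range_succ_eq_map, List.map_map]
      congr 1
      · simp
      · rw [ih (s + 1)]
        apply List.map_congr_left
        intro i _
        simp only [Function.comp]
        congr 1
        simp only [Int.ofNat_eq_natCast]
        push_cast
        ring_nf
  simpa using key xs 0

-- ===== VERDICT (by name: the statement is the Claim_ definition above) =====
theorem tabulate_picked_spec : Claim_equal_tabulate_picked := by
  intro pg _ hpre
  unfold Spec_tabulate_picked tabulate_picked tabulate_picked_alt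
  simp only [Prod.mk.injEq]
  refine ⟨pvHeader_eq pg, ?_⟩
  simp only [List.map_id']
  rw [pvConsume_eq (pvMaxLen pg) ((pg.map List.length).sum) pg rfl (pvMaxLen_le_sum pg)]
  rw [pvMax?_eq pg hpre]
  apply List.map_congr_left
  intro r _
  apply List.map_congr_left
  intro c _
  by_cases hr : r < c.length
  · simp [hr, Int.ofNat_eq_natCast, List.getD]
  · simp only [hr, if_false]
    simp [List.getD, List.getElem?_eq_none (by omega : c.length ≤ r)]
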